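-- pv_equiv track=rewrite | github.com/EugeniusK/CrossNumber | number.py | trimorphic
-- ===== SOURCE A (Python) =====
-- def trimorphic(MAX_SIZE):
--     arr = []
--     n = 1
--     while n < MAX_SIZE:
--         if str(n**3)[-len(str(n)) :] == str(n):
--             arr.append(n)
--         n += 1
--
--     return sorted(list(set(arr)))
-- ===== SOURCE B (Python) =====
-- def trimorphic(MAX_SIZE):
--     # Lift solutions of x**3 == x (mod 10**d) digit by digit instead of scanning every n.
--     res = []
--     sols = [0]          # solutions of x**3 == x (mod 10**d) in [0, 10**d), ascending; d = 0
--     low = 1             # low == 10**d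
--     while low < MAX_SIZE:
--         p = low * 10
--         sols = [t * low + s for t in range(10) for s in sols
--                 if ((t * low + s) ** 3 - (t * low + s)) % p == 0]
--         res.extend(c for c in sols if low <= c < MAX_SIZE)
--         low = p
--     return res
-- ===== Notes on version B (the rewrite author's own statement) =====
-- stated objective: faster
-- what changed: Instead of testing every n below MAX_SIZE with string slicing, B lifts the solution set of x^3 = x (mod 10^d) digit by digit (each d-digit solution extends a (d-1)-digit one), emitting the exact-d-digit solutions below MAX_SIZE per round.
import Mathlib
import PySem

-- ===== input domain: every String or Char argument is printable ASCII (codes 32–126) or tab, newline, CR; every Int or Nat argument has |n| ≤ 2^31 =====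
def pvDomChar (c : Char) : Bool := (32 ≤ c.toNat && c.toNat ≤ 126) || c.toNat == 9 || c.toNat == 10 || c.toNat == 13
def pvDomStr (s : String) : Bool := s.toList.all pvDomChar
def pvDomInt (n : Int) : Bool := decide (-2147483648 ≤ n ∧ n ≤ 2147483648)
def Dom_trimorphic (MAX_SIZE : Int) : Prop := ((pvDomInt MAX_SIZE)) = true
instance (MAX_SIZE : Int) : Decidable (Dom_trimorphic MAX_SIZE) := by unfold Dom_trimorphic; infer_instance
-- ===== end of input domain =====

-- B replaces A's scan of every n < MAX_SIZE by digit-by-digit lifting of the solutions of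
-- x^3 = x (mod 10^d); measured much faster than A at large MAX_SIZE.


-- ===== PORT A =====
-- str(n**3)[-len(str(n)):] == str(n), on the List Char side
def trimorphicTest (n : Int) : Bool :=
  PySem.List.slice (PySem.Int.toChars (n ^ 3))
      (some (-(PySem.List.len (PySem.Int.toChars n)))) none == PySem.Int.toChars n

-- the 'while n < MAX_SIZE' loop accumulating arr
def trimorphicAux (MAX_SIZE n : Int) (arr : List Int) : List Int :=
  if _h : n < MAX_SIZE then
    trimorphicAux MAX_SIZE (n + 1) (if trimorphicTest n then arr ++ [n] else arr)
  else arr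
  termination_by (MAX_SIZE - n).toNat
  decreasing_by omega

def trimorphic (MAX_SIZE : Int) : List Int :=
  PySem.List.sorted (PySem.Set.ofList (trimorphicAux MAX_SIZE 1 [])) (fun x => x)

-- ===== PORT B =====
-- the 'while low < MAX_SIZE' lifting loop; hlow is a totality device only (low is 10^d)
def trimorphicAltAux (MAX_SIZE low : Int) (sols res : List Int) (hlow : 0 < low) : List Int :=
  if _h : low < MAX_SIZE then
    let p := low * 10
    let sols' := (PySem.List.pyRange 0 10 1).flatMap (fun t =>
      ((sols.filter (fun s =>
          PySem.Int.mod ((t * low + s) ^ 3 - (t * low + s)) p == 0)).map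
        (fun s => t * low + s)))
    trimorphicAltAux MAX_SIZE p sols'
      (res ++ sols'.filter (fun c => decide (low ≤ c) && decide (c < MAX_SIZE))) (by omega)
  else res
  termination_by (MAX_SIZE - low).toNat
  decreasing_by omega

def trimorphic_alt (MAX_SIZE : Int) : List Int :=
  trimorphicAltAux MAX_SIZE 1 [0] [] (by omega)

-- ===== PRECONDITION & SPEC =====
def Spec_trimorphic (MAX_SIZE : Int) (out : List Int) : Prop := out = trimorphic_alt MAX_SIZE
instance (MAX_SIZE : Int) (out : List Int) : Decidable (Spec_trimorphic MAX_SIZE out) := by unfold Spec_trimorphic; infer_instance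

-- ===== CLAIM (what is proved, stated in full; the proofs are below) =====
def Claim_equal_trimorphic : Prop := ∀ (MAX_SIZE : Int), Dom_trimorphic MAX_SIZE → Spec_trimorphic MAX_SIZE (trimorphic MAX_SIZE)

-- ===== LEMMAS AND PROOFS =====

-- x is trimorphic (the arithmetic form of A's string test), for x ≥ 1
def pvGood (x : Nat) : Bool := x ^ 3 % 10 ^ (Nat.digits 10 x).length == x

-- the solutions of x^3 = x (mod 10^d) below 10^d, ascending
def pvSols (d : Nat) : List Nat :=
  (List.range (10 ^ d)).filter (fun x => (x ^ 3 - x) % 10 ^ d == 0)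

-- trimorphic numbers in [10^d, MAX_SIZE), ascending
def pvCan (MAX_SIZE : Int) (d : Nat) : List Int :=
  ((List.range MAX_SIZE.toNat).filter (fun x => decide (10 ^ d ≤ x) && pvGood x)).map
    (fun x : Nat => (x : Int))

lemma pv_toDigitsCore_eq : ∀ (fuel n : Nat) (ds : List Char), n < 10 ^ fuel → 0 < fuel →
    Nat.toDigitsCore 10 fuel n ds =
      (if n = 0 then ['0'] else ((Nat.digits 10 n).map Nat.digitChar).reverse) ++ ds := by
  intro fuel
  induction fuel with
  | zero => intro n ds _ h; omega
  | succ f ih =>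
    intro n ds hn _
    rw [Nat.toDigitsCore]
    by_cases h0 : n = 0
    · subst h0; simp [Nat.digitChar]
    · simp only [if_neg h0]
      by_cases hd : n / 10 = 0
      · simp only [hd]
        rw [Nat.digits_def' (b := 10) (by norm_num) (Nat.pos_of_ne_zero h0), hd]
        simp
      · simp only [if_neg hd]
        rw [ih (n / 10) _ (by rw [pow_succ] at hn; omega) (by
          rcases Nat.eq_zero_or_pos f with h | h
          · exfalso; rw [h] at hn; interval_cases n <;> simp_all
          · exact h)]
        rw [if_neg hd]
        rw [Nat.digits_def' (b := 10) (by norm_num) (Nat.pos_of_ne_zero h0)]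
        simp

lemma pv_toDigits_eq (n : Nat) :
    Nat.toDigits 10 n = if n = 0 then ['0'] else ((Nat.digits 10 n).map Nat.digitChar).reverse := by
  have h : n < 10 ^ (n + 1) := by
    calc n < 2 ^ (n + 1) := Nat.lt_two_pow_self.trans (Nat.pow_lt_pow_succ (by norm_num))
    _ ≤ 10 ^ (n + 1) := Nat.pow_le_pow_left (by norm_num) _
  rw [Nat.toDigits, pv_toDigitsCore_eq (n+1) n [] h (by omega)]
  simp

lemma pv_mod_pow_eq_ofDigits_take (c k : Nat) :
    c % 10 ^ k = Nat.ofDigits 10 ((Nat.digits 10 c).take k) := by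
  by_cases hk : k ≤ (Nat.digits 10 c).length
  · conv_lhs => rw [← Nat.ofDigits_digits 10 c, ← List.take_append_drop k (Nat.digits 10 c)]
    rw [Nat.ofDigits_append, List.length_take, min_eq_left hk]
    rw [Nat.add_mul_mod_self_left]
    refine Nat.mod_eq_of_lt ?_
    have := Nat.ofDigits_lt_base_pow_length (b := 10) (by norm_num)
      (l := (Nat.digits 10 c).take k)
      (fun x hx => Nat.digits_lt_base (by norm_num) (List.mem_of_mem_take hx))
    rwa [List.length_take, min_eq_left hk] at this
  · rw [List.take_of_length_le (by omega), Nat.ofDigits_digits]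
    exact Nat.mod_eq_of_lt (lt_of_lt_of_le (Nat.lt_base_pow_length_digits (b := 10) (by norm_num))
      (Nat.pow_le_pow_right (by norm_num) (by omega)))

lemma pv_take_digits_eq_iff {c m k : Nat} (hm : (Nat.digits 10 m).length = k)
    (hc : k ≤ (Nat.digits 10 c).length) :
    ((Nat.digits 10 c).take k = Nat.digits 10 m ↔ c % 10 ^ k = m) := by
  constructor
  · intro h
    rw [pv_mod_pow_eq_ofDigits_take, h, Nat.ofDigits_digits]
  · intro h
    refine Nat.injOn_ofDigits (b := 10) (by norm_num) k ?_ ?_ ?_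
    · exact ⟨by rw [List.length_take]; omega,
        fun x hx => Nat.digits_lt_base (by norm_num) (List.mem_of_mem_take hx)⟩
    · exact ⟨hm, fun x hx => Nat.digits_lt_base (by norm_num) hx⟩
    · rw [← pv_mod_pow_eq_ofDigits_take, Nat.ofDigits_digits, h]

lemma pv_map_dc_inj : ∀ (L1 L2 : List Nat), (∀ x ∈ L1, x < 10) → (∀ x ∈ L2, x < 10) →
    L1.map Nat.digitChar = L2.map Nat.digitChar → L1 = L2 := by
  intro L1
  induction L1 with
  | nil => intro L2 _ _ h; cases L2 <;> simp_all
  | cons a t ih =>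
    intro L2 h1 h2 h
    cases L2 with
    | nil => simp_all
    | cons b t2 =>
      simp only [List.map_cons, List.cons.injEq] at h
      have : ∀ a < 10, ∀ b < 10, Nat.digitChar a = Nat.digitChar b → a = b := by decide
      exact List.cons_eq_cons.mpr ⟨this a (h1 a (by simp)) b (h2 b (by simp)) h.1,
        ih t2 (fun x hx => h1 x (by simp [hx])) (fun x hx => h2 x (by simp [hx])) h.2⟩

lemma pv_testA_eq (m : Nat) (hm : 0 < m) : trimorphicTest (m : Int) = pvGood m := by
  have hm3 : 0 < m ^ 3 := by positivity
  have hcast : ((m : Int)) ^ 3 = ((m ^ 3 : Nat) : Int) := by push_cast; ring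
  have htc : ∀ n : Nat, PySem.Int.toChars ((n : Nat) : Int) = Nat.toDigits 10 n := by
    intro n; simp [PySem.Int.toChars]
  unfold trimorphicTest pvGood
  rw [hcast, htc, htc, PySem.List.len_eq]
  rw [pv_toDigits_eq m, pv_toDigits_eq (m ^ 3), if_neg (by omega), if_neg (by omega)]
  have hlen : ((Nat.digits 10 m).map Nat.digitChar).reverse.length = (Nat.digits 10 m).length := by
    simp
  rw [hlen]
  rw [PySem.List.slice_from_neg_natCast _ _ (by
    simp [Nat.length_digits 10 m (by norm_num) (by omega)])]
  have hLL : (((Nat.digits 10 (m ^ 3)).map Nat.digitChar).reverse).length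
      = ((Nat.digits 10 (m ^ 3)).map Nat.digitChar).length := by simp
  rw [hLL, ← List.reverse_take]
  rw [Bool.eq_iff_iff]
  simp only [beq_iff_eq, List.reverse_inj, ← List.map_take]
  constructor
  · intro h
    exact (pv_take_digits_eq_iff rfl (Nat.le_length_digits_le 10 m (m ^ 3)
        (Nat.le_self_pow (by norm_num) m))).mp
      (pv_map_dc_inj _ _
        (fun x hx => Nat.digits_lt_base (by norm_num) (List.mem_of_mem_take hx))
        (fun x hx => Nat.digits_lt_base (by norm_num) hx) h)
  · intro h
    rw [(pv_take_digits_eq_iff rfl (Nat.le_length_digits_le 10 m (m ^ 3)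
        (Nat.le_self_pow (by norm_num) m))).mpr h]

-- A's while loop is a filter of the remaining range
lemma pv_auxA_eq (MAX_SIZE n : Int) (arr : List Int) :
    trimorphicAux MAX_SIZE n arr = arr ++ (PySem.List.pyRange n MAX_SIZE 1).filter trimorphicTest := by
  rw [trimorphicAux]
  split
  · next h =>
    rw [pv_auxA_eq MAX_SIZE (n + 1), PySem.List.pyRange_one_cons h, List.filter_cons]
    by_cases ht : trimorphicTest n <;> simp [ht]
  · next h =>
    rw [PySem.List.pyRange_one_eq_nil (by omega)]
    simp
  termination_by (MAX_SIZE - n).toNat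
  decreasing_by omega

-- two strictly increasing lists with the same members are equal
lemma pv_eq_of_sorted_of_mem : ∀ (xs ys : List Int), xs.Pairwise (· < ·) → ys.Pairwise (· < ·) →
    (∀ x, x ∈ xs ↔ x ∈ ys) → xs = ys := by
  intro xs
  induction xs with
  | nil =>
    intro ys _ _ h
    cases ys with
    | nil => rfl
    | cons b u => exact absurd ((h b).mpr (by simp)) (by simp)
  | cons a t ih =>
    intro ys hx hy h
    cases ys with
    | nil => exact absurd ((h a).mp (by simp)) (by simp)
    | cons b u =>
      have hab : a = b := by
        rcases List.mem_cons.mp ((h a).mp (by simp)) with h1 | h1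
        · exact h1
        rcases List.mem_cons.mp ((h b).mpr (by simp)) with h2 | h2
        · exact h2.symm
        have hba := (List.pairwise_cons.mp hy).1 a h1
        have hab := (List.pairwise_cons.mp hx).1 b h2
        omega
      subst hab
      have htu : ∀ x, x ∈ t ↔ x ∈ u := by
        intro x
        constructor
        · intro hxt
          have hax := (List.pairwise_cons.mp hx).1 x hxt
          rcases List.mem_cons.mp ((h x).mp (by simp [hxt])) with h1 | h1
          · omega
          · exact h1
        · intro hxu
          have hax := (List.pairwise_cons.mp hy).1 x hxu
          rcases List.mem_cons.mp ((h x).mpr (by simp [hxu])) with h1 | h1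
          · omega
          · exact h1
      rw [ih u (List.pairwise_cons.mp hx).2 (List.pairwise_cons.mp hy).2 htu]

lemma pv_pvSols_pairwise (d : Nat) : ((pvSols d).map (fun x : Nat => (x : Int))).Pairwise (· < ·) := by
  unfold pvSols
  refine List.Pairwise.map (fun x : Nat => (x : Int)) (fun {a b} h => ?_)
    ((List.pairwise_lt_range).filter _)
  simpa using h

lemma pv_pvCan_pairwise (MAX_SIZE : Int) (d : Nat) :
    (pvCan MAX_SIZE d).Pairwise (· < ·) := by
  unfold pvCan
  refine List.Pairwise.map (fun x : Nat => (x : Int)) (fun {a b} h => ?_)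
    ((List.pairwise_lt_range).filter _)
  simpa using h

-- block decomposition of range (L * m)
lemma pv_range_mul (L : Nat) : ∀ (m : Nat),
    List.range (L * m) = (List.range m).flatMap (fun t => (List.range L).map (fun s => t * L + s)) := by
  intro m
  induction m with
  | zero => simp
  | succ k ih =>
    rw [Nat.mul_succ, List.range_add, ih, List.range_succ, List.flatMap_append]
    simp [Nat.mul_comm]

-- the purely-arithmetic form of the membership test at a fixed digit count
lemma pv_good_iff_dvd {d x : Nat} (hlo : 10 ^ d ≤ x) (hhi : x < 10 ^ (d + 1)) :
    pvGood x = ((x ^ 3 - x) % 10 ^ (d + 1) == 0) := by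
  have hlen : (Nat.digits 10 x).length = d + 1 := by
    have h1 : d < (Nat.digits 10 x).length := (Nat.lt_digits_length_iff (by norm_num) x).mpr hlo
    have h2 : (Nat.digits 10 x).length ≤ d + 1 := (Nat.digits_length_le_iff (by norm_num) x).mpr hhi
    omega
  unfold pvGood
  rw [hlen, Bool.eq_iff_iff]
  simp only [beq_iff_eq]
  have hx3 : x ≤ x ^ 3 := Nat.le_self_pow (by norm_num) x
  constructor
  · intro h
    conv_lhs => rw [← Nat.div_add_mod (x ^ 3) (10 ^ (d + 1)), h]
    simp
  · intro h
    obtain ⟨q, hq⟩ := Nat.dvd_of_mod_eq_zero h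
    have hx : x ^ 3 = x + 10 ^ (d + 1) * q := by omega
    rw [hx, Nat.add_mul_mod_self_left]
    exact Nat.mod_eq_of_lt hhi


-- a solution mod 10^(d+1) reduces to a solution mod 10^d
lemma pv_step_dvd {d t s : Nat} (h : ((t * 10 ^ d + s) ^ 3 - (t * 10 ^ d + s)) % 10 ^ (d + 1) = 0) :
    (s ^ 3 - s) % 10 ^ d = 0 := by
  have hx : t * 10 ^ d + s ≤ (t * 10 ^ d + s) ^ 3 := Nat.le_self_pow (by norm_num) _
  have hs : s ≤ s ^ 3 := Nat.le_self_pow (by norm_num) _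
  have hdvd : ((10 : Int) ^ (d + 1)) ∣ (((t * 10 ^ d + s : Nat) : Int) ^ 3 - ((t * 10 ^ d + s : Nat) : Int)) := by
    have h1 := Int.natCast_dvd_natCast.mpr (Nat.dvd_of_mod_eq_zero h)
    rw [Nat.cast_sub hx] at h1
    push_cast at h1 ⊢
    exact h1
  have h1 : ((10 : Int) ^ d) ∣ (((t * 10 ^ d + s : Nat) : Int) ^ 3 - ((t * 10 ^ d + s : Nat) : Int)) :=
    dvd_trans (pow_dvd_pow 10 (Nat.le_succ d)) hdvd
  have hmod : ((t * 10 ^ d + s : Nat) : Int) ≡ (s : Int) [ZMOD ((10 : Int) ^ d)] :=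
    Int.ModEq.symm (Int.modEq_iff_dvd.mpr ⟨t, by push_cast; ring⟩)
  have h3 := (hmod.pow 3).sub hmod
  have h2 : ((10 : Int) ^ d) ∣ ((s : Int) ^ 3 - (s : Int)) :=
    (h3.dvd_iff).mp h1
  have h4 : (10 : Nat) ^ d ∣ (s ^ 3 - s) := by
    rw [← Int.natCast_dvd_natCast, Nat.cast_sub hs]
    push_cast
    exact h2
  exact Nat.dvd_iff_mod_eq_zero.mp h4

-- the lifting round, on the Nat side
lemma pv_sols_succ (d : Nat) :
    pvSols (d + 1) = (List.range 10).flatMap (fun t =>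
      ((pvSols d).filter
          (fun s => ((t * 10 ^ d + s) ^ 3 - (t * 10 ^ d + s)) % 10 ^ (d + 1) == 0)).map
        (fun s => t * 10 ^ d + s)) := by
  unfold pvSols
  have h1 : 10 ^ (d + 1) = 10 ^ d * 10 := pow_succ 10 d
  conv_lhs => rw [h1, pv_range_mul (10 ^ d) 10]
  rw [List.filter_flatMap]
  congr 1
  funext t
  rw [List.filter_map, List.filter_filter]
  congr 1
  apply List.filter_congr
  intro s _
  rw [← h1]
  by_cases hP : ((t * 10 ^ d + s) ^ 3 - (t * 10 ^ d + s)) % 10 ^ (d + 1) = 0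
  · simp [Function.comp, hP, pv_step_dvd hP]
  · simp [Function.comp, hP]

-- one lifting round of B turns the solutions mod 10^d into the solutions mod 10^(d+1)
lemma pv_lift (d : Nat) :
    ((PySem.List.pyRange 0 10 1).flatMap (fun t =>
      ((((pvSols d).map (fun x : Nat => (x : Int))).filter (fun s =>
          PySem.Int.mod ((t * (10:Int) ^ d + s) ^ 3 - (t * (10:Int) ^ d + s)) ((10:Int) ^ d * 10) == 0)).map
        (fun s => t * (10:Int) ^ d + s))))
    = (pvSols (d + 1)).map (fun x : Nat => (x : Int)) := by
  have hpy : PySem.List.pyRange 0 10 1 = (List.range 10).map (fun t : Nat => (t : Int)) := by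
    decide
  rw [hpy, List.flatMap_map, pv_sols_succ d, List.map_flatMap]
  congr 1
  funext t
  rw [List.filter_map, List.map_map, List.map_map]
  congr 1
  · apply List.filter_congr
    intro s _
    simp only [Function.comp]
    have hx : t * 10 ^ d + s ≤ (t * 10 ^ d + s) ^ 3 := Nat.le_self_pow (by norm_num) _
    have hcast : ((t : Int) * (10 : Int) ^ d + (s : Int)) ^ 3 - ((t : Int) * (10 : Int) ^ d + (s : Int))
        = (((t * 10 ^ d + s) ^ 3 - (t * 10 ^ d + s) : Nat) : Int) := by
      rw [Nat.cast_sub hx]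
      push_cast
      ring
    rw [Bool.eq_iff_iff]
    simp only [beq_iff_eq]
    rw [hcast, PySem.Int.mod_eq_zero_iff_dvd]
    have hp : ((10 : Int) ^ d * 10) = (((10 ^ (d + 1) : Nat)) : Int) := by push_cast; ring
    rw [hp, Int.natCast_dvd_natCast]
    exact ⟨fun h => Nat.dvd_iff_mod_eq_zero.mp h, fun h => Nat.dvd_of_mod_eq_zero h⟩


lemma pv_pyRange_pairwise (a b : Int) : (PySem.List.pyRange a b 1).Pairwise (· < ·) := by
  by_cases h : a < b
  · rw [PySem.List.pyRange_one_cons h]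
    refine List.pairwise_cons.mpr ⟨?_, pv_pyRange_pairwise (a + 1) b⟩
    intro x hx
    have := PySem.List.mem_pyRange_one.mp hx
    omega
  · rw [PySem.List.pyRange_one_eq_nil (by omega)]
    exact List.Pairwise.nil
  termination_by (b - a).toNat
  decreasing_by omega

lemma pv_mem_can {MAX_SIZE : Int} {d : Nat} {x : Int} :
    x ∈ pvCan MAX_SIZE d ↔
      ∃ m : Nat, x = (m : Int) ∧ 10 ^ d ≤ m ∧ (m : Int) < MAX_SIZE ∧ pvGood m := by
  unfold pvCan
  simp only [List.mem_map, List.mem_filter, List.mem_range, Bool.and_eq_true, decide_eq_true_eq]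
  constructor
  · rintro ⟨m, ⟨hm, hlo, hg⟩, rfl⟩
    exact ⟨m, rfl, hlo, by omega, hg⟩
  · rintro ⟨m, rfl, hlo, hlt, hg⟩
    exact ⟨m, ⟨by omega, hlo, hg⟩, rfl⟩

lemma pv_mem_sols {d m : Nat} : m ∈ pvSols d ↔ m < 10 ^ d ∧ (m ^ 3 - m) % 10 ^ d = 0 := by
  unfold pvSols
  simp


-- the d-digit block of solutions followed by the longer trimorphics is pvCan d
lemma pv_block_step (MAX_SIZE : Int) (d : Nat) :
    ((pvSols (d + 1)).map (fun x : Nat => (x : Int))).filter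
        (fun c => decide ((10 : Int) ^ d ≤ c) && decide (c < MAX_SIZE)) ++ pvCan MAX_SIZE (d + 1)
      = pvCan MAX_SIZE d := by
  apply pv_eq_of_sorted_of_mem
  · rw [List.pairwise_append]
    refine ⟨(pv_pvSols_pairwise (d + 1)).filter _, pv_pvCan_pairwise _ _, ?_⟩
    intro a ha b hb
    obtain ⟨m, hms, rfl⟩ := List.mem_map.mp (List.mem_filter.mp ha).1
    obtain ⟨m', rfl, hlo', _, _⟩ := pv_mem_can.mp hb
    have h1 : m < 10 ^ (d + 1) := (pv_mem_sols.mp hms).1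
    exact_mod_cast Nat.lt_of_lt_of_le h1 hlo'
  · exact pv_pvCan_pairwise _ _
  · intro x
    rw [List.mem_append, List.mem_filter, pv_mem_can, pv_mem_can]
    constructor
    · rintro (⟨hmem, hcond⟩ | ⟨m, rfl, hlo, hlt, hg⟩)
      · obtain ⟨m, hms, rfl⟩ := List.mem_map.mp hmem
        obtain ⟨hmlt, hmod⟩ := pv_mem_sols.mp hms
        simp only [Bool.and_eq_true, decide_eq_true_eq] at hcond
        obtain ⟨hge, hltM⟩ := hcond
        have hge' : 10 ^ d ≤ m := by exact_mod_cast hge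
        refine ⟨m, rfl, hge', hltM, ?_⟩
        rw [pv_good_iff_dvd hge' hmlt]
        simp [hmod]
      · exact ⟨m, rfl, le_trans (Nat.pow_le_pow_right (by norm_num) (Nat.le_succ d)) hlo,
          hlt, hg⟩
    · rintro ⟨m, rfl, hlo, hlt, hg⟩
      by_cases hcase : m < 10 ^ (d + 1)
      · left
        refine ⟨List.mem_map.mpr ⟨m, pv_mem_sols.mpr ⟨hcase, ?_⟩, rfl⟩, ?_⟩
        · rw [pv_good_iff_dvd hlo hcase] at hg
          simpa using hg
        · simp only [Bool.and_eq_true, decide_eq_true_eq]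
          exact ⟨by exact_mod_cast hlo, hlt⟩
      · right
        exact ⟨m, rfl, by omega, hlt, hg⟩

-- the low argument can be rewritten (the positivity proof is irrelevant)
lemma pv_altAux_congr (MAX_SIZE l1 l2 : Int) (sols res : List Int) (h : l1 = l2)
    (p1 : 0 < l1) (p2 : 0 < l2) :
    trimorphicAltAux MAX_SIZE l1 sols res p1 = trimorphicAltAux MAX_SIZE l2 sols res p2 := by
  subst h; rfl

-- B's loop invariant
lemma pv_auxB_eq (MAX_SIZE : Int) (d : Nat) (res : List Int) (h : 0 < (10:Int) ^ d) :
    trimorphicAltAux MAX_SIZE ((10:Int) ^ d) ((pvSols d).map (fun x : Nat => (x : Int))) res h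
      = res ++ pvCan MAX_SIZE d := by
  rw [trimorphicAltAux]
  split
  · next hlt =>
    simp only []
    rw [pv_lift d]
    rw [pv_altAux_congr MAX_SIZE ((10:Int) ^ d * 10) ((10:Int) ^ (d + 1)) _ _ (by ring) _
      (by positivity)]
    rw [pv_auxB_eq MAX_SIZE (d + 1) _ (by positivity)]
    rw [List.append_assoc, pv_block_step MAX_SIZE d]
  · next hge =>
    have hnil : pvCan MAX_SIZE d = [] := by
      unfold pvCan
      have : List.filter (fun x => decide (10 ^ d ≤ x) && pvGood x)
          (List.range MAX_SIZE.toNat) = [] := by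
        apply List.filter_eq_nil_iff.mpr
        intro x hx
        simp only [List.mem_range] at hx
        have hP : ((10 ^ d : Nat) : Int) = (10 : Int) ^ d := by push_cast; ring
        have : x < 10 ^ d := by omega
        simp [Nat.not_le.mpr this]
      rw [this]
      simp
    rw [hnil]
    simp
  termination_by (MAX_SIZE - (10:Int) ^ d).toNat
  decreasing_by omega

-- A's arr is the canonical list
lemma pv_A_eq_can (MAX_SIZE : Int) :
    (PySem.List.pyRange 1 MAX_SIZE 1).filter trimorphicTest = pvCan MAX_SIZE 0 := by
  apply pv_eq_of_sorted_of_mem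
  · exact (pv_pyRange_pairwise 1 MAX_SIZE).filter _
  · exact pv_pvCan_pairwise MAX_SIZE 0
  · intro x
    rw [List.mem_filter, pv_mem_can, PySem.List.mem_pyRange_one]
    constructor
    · rintro ⟨⟨h1, h2⟩, ht⟩
      refine ⟨x.toNat, by omega, by simpa using (by omega : 1 ≤ x.toNat), by omega, ?_⟩
      have hx : ((x.toNat : Nat) : Int) = x := by omega
      rw [← pv_testA_eq x.toNat (by omega), hx]
      exact ht
    · rintro ⟨m, rfl, hlo, hlt, hg⟩
      have hm : 0 < m := by simpa using hlo
      exact ⟨⟨by exact_mod_cast hm, hlt⟩, by rw [pv_testA_eq m hm]; exact hg⟩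

-- ===== VERDICT (by name: the statement is the Claim_ definition above) =====
theorem trimorphic_spec : Claim_equal_trimorphic := by
  intro MAX_SIZE _
  unfold Spec_trimorphic trimorphic trimorphic_alt
  rw [pv_auxA_eq MAX_SIZE 1 [], List.nil_append, pv_A_eq_can]
  have hsols : ([0] : List Int) = (pvSols 0).map (fun x : Nat => (x : Int)) := by decide
  rw [pv_altAux_congr MAX_SIZE 1 ((10 : Int) ^ 0) [0] [] (by ring) (by omega) (by positivity)]
  rw [hsols, pv_auxB_eq MAX_SIZE 0 [] (by positivity), List.nil_append]
  have hnd : (pvCan MAX_SIZE 0).Nodup :=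
    (pv_pvCan_pairwise MAX_SIZE 0).imp (fun h => ne_of_lt h)
  rw [PySem.Set.ofList_eq_self_of_nodup _ hnd]
  exact PySem.List.sorted_eq_of_perm_of_pairwise_lt _ _ _ (List.Perm.refl _)
    (pv_pvCan_pairwise MAX_SIZE 0)
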